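-- pv_equiv track=rewrite | github.com/TejaSriRam111/CiCd-Ai-Agent | generator/workflow_writer.py | ensure_minimum_steps
-- ===== SOURCE A (Python) =====
-- def ensure_minimum_steps(yaml_text: str) -> str:
--     """
--     Ensure every job has at least one valid step.
--     Fixes empty 'steps:' blocks which break GitHub Actions.
--     """
--
--     lines = yaml_text.splitlines()
--     fixed_lines = []
--
--     i = 0
--     while i < len(lines):
--         line = lines[i]
--         fixed_lines.append(line)
--
--         if line.strip() == "steps:":
--             j = i + 1
--             has_step = False
--
--             while j < len(lines):
--                 next_line = lines[j].strip()
--                 if next_line == "" or next_line.startswith("#"):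
--                     j += 1
--                     continue
--                 if next_line.startswith("-"):
--                     has_step = True
--                 break
--
--             if not has_step:
--                 indent = line[:len(line) - len(line.lstrip())]
--                 fixed_lines.append(f"{indent}- uses: actions/checkout@v4")
--
--         i += 1
--
--     return "\n".join(fixed_lines)
-- ===== SOURCE B (Python) =====
-- def ensure_minimum_steps(yaml_text: str) -> str:
--     """Single forward pass: buffer blank/comment lines after a bare 'steps:'
--     until the next significant line decides whether to insert the default step."""
--     out = []
--     buf = None   # lines buffered after a pending 'steps:' line
--     indent = ""
--     for line in yaml_text.splitlines():
--         s = line.strip()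
--         if buf is not None:
--             if s == "" or s.startswith("#"):
--                 buf.append(line)
--                 continue
--             if not s.startswith("-"):
--                 out.append(indent + "- uses: actions/checkout@v4")
--             out.extend(buf)
--             buf = None
--         out.append(line)
--         if s == "steps:":
--             indent = line[:len(line) - len(line.lstrip())]
--             buf = []
--     if buf is not None:
--         out.append(indent + "- uses: actions/checkout@v4")
--         out.extend(buf)
--     return "\n".join(out)
-- ===== Notes on version B (the rewrite author's own statement) =====
-- stated objective: faster
-- what changed: A re-scans forward from every 'steps:' line to find the next significant line (nested loops); B makes a single forward pass, buffering blank/comment lines after a pending bare 'steps:' and deciding the insertion when the next significant line (or EOF) arrives.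
import Mathlib
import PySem

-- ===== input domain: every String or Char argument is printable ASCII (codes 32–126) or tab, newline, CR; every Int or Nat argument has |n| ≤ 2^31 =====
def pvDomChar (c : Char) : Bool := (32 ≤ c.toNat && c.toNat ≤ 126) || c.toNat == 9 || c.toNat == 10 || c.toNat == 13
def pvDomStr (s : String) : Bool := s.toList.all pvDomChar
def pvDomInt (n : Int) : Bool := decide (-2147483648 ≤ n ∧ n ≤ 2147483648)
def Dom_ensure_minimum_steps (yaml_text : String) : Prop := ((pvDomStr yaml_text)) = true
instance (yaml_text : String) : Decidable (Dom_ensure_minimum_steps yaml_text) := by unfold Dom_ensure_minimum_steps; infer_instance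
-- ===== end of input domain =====

-- B replaces A's quadratic look-ahead rescans after each 'steps:' line with one
-- forward pass that buffers blank/comment lines until the next significant line (objective: faster).

-- ===== PORT A =====
-- inner 'while j < len(lines)' look-ahead of A: advances past blank/comment lines,
-- true iff the first significant line starts with '-'
def pvHasStep : List String → Bool
  | [] => false
  | l :: t =>
    let s := PySem.Str.strip l
    if (s == "") || PySem.Str.startswith s "#" then pvHasStep t
    else PySem.Str.startswith s "-"

-- indent = line[:len(line) - len(line.lstrip())]
def pvIndentA (line : String) : String :=
  PySem.Str.slice line none (some (PySem.Str.len line - PySem.Str.len (PySem.Str.lstrip line)))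

-- outer 'while i < len(lines)' loop of A
def pvGoA : List String → List String
  | [] => []
  | line :: rest =>
    line ::
      (if PySem.Str.strip line == "steps:" then
        (if pvHasStep rest then pvGoA rest
         else (pvIndentA line ++ "- uses: actions/checkout@v4") :: pvGoA rest)
       else pvGoA rest)

def ensure_minimum_steps (yaml_text : String) : String :=
  PySem.Str.join "\n" (pvGoA (PySem.Str.splitlines yaml_text))

-- ===== PORT B =====
-- indent = line[:len(line) - len(line.lstrip())]
def pvIndentB (line : String) : String :=
  PySem.Str.slice line none (some (PySem.Str.len line - PySem.Str.len (PySem.Str.lstrip line)))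

-- B's single forward pass; the state is Source B's (indent, buf) when buf is not None.
-- The imperative 'out' accumulator is rendered as the returned suffix of output lines.
def pvGoB : List String → Option (String × List String) → List String
  | [], none => []
  | [], some (ind, buf) => (ind ++ "- uses: actions/checkout@v4") :: buf
  | line :: rest, pending =>
    let s := PySem.Str.strip line
    match pending with
    | some (ind, buf) =>
      if (s == "") || PySem.Str.startswith s "#" then
        pvGoB rest (some (ind, buf ++ [line]))
      else
        (if PySem.Str.startswith s "-" then ([] : List String)
         else [ind ++ "- uses: actions/checkout@v4"]) ++ buf ++
          (line :: (if s == "steps:" then pvGoB rest (some (pvIndentB line, [])) else pvGoB rest none))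
    | none =>
      line :: (if s == "steps:" then pvGoB rest (some (pvIndentB line, [])) else pvGoB rest none)

def ensure_minimum_steps_alt (yaml_text : String) : String :=
  PySem.Str.join "\n" (pvGoB (PySem.Str.splitlines yaml_text) none)

-- ===== PRECONDITION & SPEC =====
def Spec_ensure_minimum_steps (yaml_text : String) (out : String) : Prop := out = ensure_minimum_steps_alt yaml_text
instance (yaml_text : String) (out : String) : Decidable (Spec_ensure_minimum_steps yaml_text out) := by unfold Spec_ensure_minimum_steps; infer_instance

-- ===== CLAIM (what is proved, stated in full; the proofs are below) =====
def Claim_equal_ensure_minimum_steps : Prop := ∀ (yaml_text : String), Dom_ensure_minimum_steps yaml_text → Spec_ensure_minimum_steps yaml_text (ensure_minimum_steps yaml_text)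

-- ===== LEMMAS AND PROOFS =====

theorem pvStartswith_hash_ne (s : String) (h : PySem.Str.startswith s "#" = true) :
    (s == "steps:") = false := by
  cases hb : (s == "steps:") with
  | false => rfl
  | true =>
    exfalso
    rw [beq_iff_eq] at hb
    subst hb
    revert h
    decide

-- Combined invariant: B with no pending state agrees with A, and B in a pending
-- state resolves to A's output with the buffered lines and (maybe) the default line.
theorem pvGoB_invariant (l : List String) :
    pvGoB l none = pvGoA l ∧
      ∀ ind buf, pvGoB l (some (ind, buf)) =
        (if pvHasStep l then buf ++ pvGoA l
         else (ind ++ "- uses: actions/checkout@v4") :: (buf ++ pvGoA l)) := by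
  induction l with
  | nil => simp [pvGoB, pvGoA, pvHasStep]
  | cons line rest ih =>
    obtain ⟨ihn, ihp⟩ := ih
    constructor
    · show pvGoB (line :: rest) none = pvGoA (line :: rest)
      simp only [pvGoB, pvGoA]
      by_cases hs : (PySem.Str.strip line == "steps:") = true
      · simp only [hs, if_pos]
        rw [ihp]
        simp [pvIndentA, pvIndentB]
      · simp only [Bool.not_eq_true] at hs
        simp only [hs, if_neg, Bool.false_eq_true, not_false_iff, ihn]
    · intro ind buf
      show pvGoB (line :: rest) (some (ind, buf)) = _
      simp only [pvGoB, pvGoA, pvHasStep]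
      by_cases hbc : ((PySem.Str.strip line == "") || PySem.Str.startswith (PySem.Str.strip line) "#") = true
      · -- blank or comment line: buffered; A copies it (it cannot be 'steps:')
        have hns : (PySem.Str.strip line == "steps:") = false := by
          rcases Bool.or_eq_true_iff.mp hbc with h | h
          · rw [beq_iff_eq] at h; rw [h]; rfl
          · exact pvStartswith_hash_ne _ h
        simp only [hbc, if_pos, hns, Bool.false_eq_true, if_neg, not_false_iff]
        rw [ihp]
        by_cases hh : pvHasStep rest = true
        · simp [hh]
        · simp only [Bool.not_eq_true] at hh
          simp [hh]
      · -- significant line: pending resolves here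
        simp only [hbc, Bool.false_eq_true, if_neg, not_false_iff]
        by_cases hd : PySem.Str.startswith (PySem.Str.strip line) "-" = true
        · simp only [hd, if_pos, List.nil_append]
          by_cases hs : (PySem.Str.strip line == "steps:") = true
          · simp only [hs, if_pos]; rw [ihp]; simp [pvIndentA, pvIndentB]
          · simp only [Bool.not_eq_true] at hs
            simp only [hs, Bool.false_eq_true, if_neg, not_false_iff, ihn]
        · simp only [Bool.not_eq_true] at hd
          simp only [hd, Bool.false_eq_true, if_neg, not_false_iff]
          by_cases hs : (PySem.Str.strip line == "steps:") = true
          · simp only [hs, if_pos]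
            rw [ihp]
            simp [pvIndentA, pvIndentB]
          · simp only [Bool.not_eq_true] at hs
            simp only [hs, Bool.false_eq_true, if_neg, not_false_iff, ihn]
            simp

theorem pvGoB_eq_pvGoA (l : List String) : pvGoB l none = pvGoA l :=
  (pvGoB_invariant l).1

-- ===== VERDICT (by name: the statement is the Claim_ definition above) =====
theorem ensure_minimum_steps_spec : Claim_equal_ensure_minimum_steps := by
  intro yaml_text _
  show ensure_minimum_steps yaml_text = ensure_minimum_steps_alt yaml_text
  unfold ensure_minimum_steps ensure_minimum_steps_alt
  rw [pvGoB_eq_pvGoA]
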